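-- pv_equiv track=rewrite | github.com/uujinn/Algorithm-Study | BOJ/Data_Structure/2800-괄호_제거-MH.py | solution
-- ===== SOURCE A (Python) =====
-- from itertools import combinations
--
-- def solution(expression):
--     bracket_num = 0             # 괄호가 몇 쌍있는지 저장
--     stack = []                  # 괄호의 짝을 찾기 위한 stack
--     exp_index = []              # 전체 수식의 index를 저장
--     combi = []                  # 모든 조합
--     answer = []
--
--     for exp in expression:                  # 입력받은 수식에 하나씩 index 부여
--         if exp == '(':                      # (2+(2*2)+2) 이면
--             stack.append(bracket_num)       # [0, -100, -100, 1, -100, -100, -100, 1, -100, -100, 0]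
--             exp_index.append(bracket_num)
--             bracket_num += 1
--         elif exp == ')':
--             exp_index.append(stack.pop())
--         else:
--             exp_index.append(-100)
--
--     combi_list = [i for i in range(bracket_num)]        # 조합을 위한 리스트
--
--     for i in range(bracket_num):                        # 괄호 1 ~ n개 제거의 조합을 담은 리스트
--         for j in list(combinations(combi_list, i + 1)):
--             combi.append(j)
--
--     for c in combi:                         # 조합 경우의 수에 따라 나올 수 있는 식 저장
--         temp = ''
--         for exp, idx in zip(expression, exp_index):
--             if idx not in c or idx == -100:
--                 temp += str(exp)
--         answer.append(temp)
--
--     return '\n'.join(sorted(set(answer)))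
-- ===== SOURCE B (Python) =====
-- def solution(expression):
--     # Recursive divide-and-conquer: stack-match each '(' to its ')' once, then
--     # generate the variant set of each segment directly — walking the segment's
--     # top level with an accumulator set and, at each matched pair, combining the
--     # accumulated prefixes with the nested segment's variants both with and
--     # without the enclosing brackets — instead of enumerating subsets of pairs
--     # and filtering the string once per subset.
--     match, st = {}, []
--     for i, ch in enumerate(expression):
--         if ch == '(':
--             st.append(i)
--         elif ch == ')':
--             match[st.pop()] = i
--
--     def seg(i, j):
--         # all variants of expression[i:j]; recursion depth = bracket nesting depth
--         out = {''}
--         p = i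
--         while p < j:
--             ch = expression[p]
--             if ch == '(' and p in match:
--                 k = match[p]
--                 inner = seg(p + 1, k)
--                 out = {a + b for a in out for b in inner} | \
--                       {a + '(' + b + ')' for a in out for b in inner}
--                 p = k + 1
--             else:
--                 out = {a + ch for a in out}
--                 p += 1
--         return out
--
--     variants = seg(0, len(expression))
--     variants.discard(expression)
--     return '\n'.join(sorted(variants))
-- ===== Notes on version B (the rewrite author's own statement) =====
-- stated objective: alternative
-- what changed: B replaces A's flat enumeration (tag every character with a pair number, loop over all itertools.combinations of pair numbers and filter the string once per combination) with a recursive divide-and-conquer generator: brackets are stack-matched into a position map once, and each segment's variant set is built structurally by walking its top level with an accumulator set, combining at every matched pair the accumulated prefixes with the nested segment's variants both with and without the enclosing brackets, then discarding the unmodified original.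
-- outside the precondition, e.g. on solution('(a'): A returns 'a', B returns ''; on solution('(('): A returns '\n(', B returns ''
import Mathlib
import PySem

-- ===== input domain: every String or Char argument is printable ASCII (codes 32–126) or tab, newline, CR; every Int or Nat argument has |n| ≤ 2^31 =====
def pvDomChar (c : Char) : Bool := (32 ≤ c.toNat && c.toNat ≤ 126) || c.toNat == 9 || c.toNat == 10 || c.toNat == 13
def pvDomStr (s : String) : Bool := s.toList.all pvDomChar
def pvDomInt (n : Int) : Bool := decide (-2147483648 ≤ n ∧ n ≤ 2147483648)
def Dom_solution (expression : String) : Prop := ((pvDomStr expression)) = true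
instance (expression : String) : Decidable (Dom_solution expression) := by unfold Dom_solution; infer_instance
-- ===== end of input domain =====

-- B stack-matches each '(' to its ')' once and generates the variant set of each segment by a
-- recursive divide-and-conquer (inner-variants × tail-variants, with and without the enclosing
-- pair), instead of A's per-character pair tags + itertools.combinations over tag numbers with
-- one filtering pass per combination; equal output on bracket-balanced input.

-- ===== PORT A =====
-- Python stacks push/pop at the right end; the Lean stack keeps its top at the list head.
-- One step of A's tagging loop; 'none' = the IndexError of stack.pop() on an unmatched ')'.
def solutionTag (st : Option (Int × List Int × List Int)) (exp : Char) :
    Option (Int × List Int × List Int) :=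
  match st with
  | none => none
  | some (bn, stack, expIndex) =>
    if exp = '(' then some (bn + 1, bn :: stack, expIndex ++ [bn])
    else if exp = ')' then
      match stack with
      | [] => none
      | t :: rest => some (bn, rest, expIndex ++ [t])
    else some (bn, stack, expIndex ++ [-100])

def solution (expression : String) : String :=
  match expression.toList.foldl solutionTag (some (0, [], [])) with
  | none => ""   -- Python raises IndexError here (excluded by Pre_solution)
  | some (bracketNum, _stack, expIndex) =>
    let combiList := PySem.List.pyRange 0 bracketNum 1
    let combi := (PySem.List.pyRange 0 bracketNum 1).foldl
        (fun acc i => acc ++ PySem.List.combinations combiList (i + 1).toNat) []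
    let answer := combi.foldl (fun acc c =>
        acc ++ [String.ofList ((expression.toList.zip expIndex).foldl
            (fun temp p => if p.2 ∉ c ∨ p.2 = -100 then temp ++ [p.1] else temp) [])]) []
    PySem.Str.join "\n" (PySem.List.sorted (PySem.Set.ofList answer) (fun x => x) false)

-- ===== PORT B =====
-- One step of B's matching loop over enumerate(expression): stack of open positions and the
-- open→close dict; 'none' = the IndexError of st.pop() on an unmatched ')'.
def solutionAltMatch (st : Option (List Int × PySem.Dict Int Int)) (p : Int × Char) :
    Option (List Int × PySem.Dict Int Int) :=
  match st with
  | none => none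
  | some (stack, m) =>
    if p.2 = '(' then some (p.1 :: stack, m)
    else if p.2 = ')' then
      match stack with
      | [] => none
      | a :: rest => some (rest, m.insert a p.1)
    else some (stack, m)

-- B's generator seg(i, j): all variants of expression[i:j], walking the top level of the
-- segment with an accumulator set and recursing only into nested pairs.  The fuel argument
-- (j - i at the top call) only makes the recursion structural; it is never exhausted on the
-- admitted inputs.  The pyGetD default is never used: every reachable call has 0 ≤ p < len.
def solutionSeg (cs : List Char) (m : PySem.Dict Int Int) :
    Nat → Int → Int → PySem.Set (List Char) → PySem.Set (List Char)
  | 0, _, _, out => out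
  | fuel + 1, p, j, out =>
    if j ≤ p then out
    else
      let ch := PySem.List.pyGetD cs p ' '
      if ch = '(' then
        match m.get? p with
        | some k =>
          let inner := solutionSeg cs m fuel (p + 1) k (PySem.Set.ofList [[]])
          let out' := PySem.Set.union
            (PySem.Set.ofList (out.flatMap (fun a => inner.map (fun b => a ++ b))))
            (PySem.Set.ofList (out.flatMap (fun a => inner.map (fun b => a ++ '(' :: b ++ [')']))))
          solutionSeg cs m fuel (k + 1) j out'
        | none => solutionSeg cs m fuel (p + 1) j (PySem.Set.ofList (out.map (· ++ [ch])))
      else solutionSeg cs m fuel (p + 1) j (PySem.Set.ofList (out.map (· ++ [ch])))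

def solution_alt (expression : String) : String :=
  let cs := expression.toList
  match (PySem.List.enumerate cs 0).foldl solutionAltMatch (some ([], PySem.Dict.mk [])) with
  | none => ""   -- Python raises IndexError here (excluded by Pre_solution)
  | some (_, m) =>
    let variants := solutionSeg cs m cs.length 0 (cs.length : Int) (PySem.Set.ofList [[]])
    let variants := PySem.Set.discard variants cs
    PySem.Str.join "\n" (PySem.List.sorted (variants.map String.ofList) (fun x => x) false)

-- ===== PRECONDITION & SPEC =====
-- Pre_ excludes bracket-unbalanced inputs: on an unmatched closing bracket A raises IndexError,
-- and on an unmatched opening bracket A treats the lone unclosed bracket as removable by itself,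
-- an artefact of its tagging both programs may reasonably differ on, while B removes only
-- matched pairs (excluded examples are in the claim's cites).
def Pre_solution (expression : String) : Prop :=
  (∀ k ≤ expression.toList.length,
      (expression.toList.take k).count ')' ≤ (expression.toList.take k).count '(') ∧
  expression.toList.count '(' = expression.toList.count ')'

instance (expression : String) : Decidable (Pre_solution expression) := by
  unfold Pre_solution; infer_instance

def pvWitness_solution : String := "(2+(2*2)+2)"

def Spec_solution (expression : String) (out : String) : Prop := out = solution_alt expression
instance (expression : String) (out : String) : Decidable (Spec_solution expression out) := by
  unfold Spec_solution; infer_instance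

-- ===== CLAIM (what is proved, stated in full; the proofs are below) =====
def Claim_equal_solution : Prop := ∀ (expression : String), Dom_solution expression →
  Pre_solution expression → Spec_solution expression (solution expression)

-- ===== LEMMAS AND PROOFS =====

-- ---- generic helpers ----

theorem pvForall₂_mem_left {α β : Type} {R : α → β → Prop} {l1 : List α} {l2 : List β}
    (h : List.Forall₂ R l1 l2) {a : α} (ha : a ∈ l1) : ∃ b ∈ l2, R a b := by
  induction h with
  | nil => cases ha
  | cons hr _ ih =>
    rcases List.mem_cons.mp ha with rfl | ha'
    · exact ⟨_, List.mem_cons_self, hr⟩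
    · rcases ih ha' with ⟨b, hb, hr'⟩; exact ⟨b, List.mem_cons_of_mem _ hb, hr'⟩

theorem pvForall₂_mem_right {α β : Type} {R : α → β → Prop} {l1 : List α} {l2 : List β}
    (h : List.Forall₂ R l1 l2) {b : β} (hb : b ∈ l2) : ∃ a ∈ l1, R a b := by
  induction h with
  | nil => cases hb
  | cons hr _ ih =>
    rcases List.mem_cons.mp hb with rfl | hb'
    · exact ⟨_, List.mem_cons_self, hr⟩
    · rcases ih hb' with ⟨a, ha, hr'⟩; exact ⟨a, List.mem_cons_of_mem _ ha, hr'⟩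

theorem pvPairwise_of_mem {α : Type} {R : α → α → Prop} {l : List α}
    (h : l.Pairwise R) {a b : α} (ha : a ∈ l) (hb : b ∈ l) :
    a = b ∨ R a b ∨ R b a := by
  induction h with
  | nil => cases ha
  | @cons x t hx _ ih =>
    rcases List.mem_cons.mp ha with rfl | ha'
    · rcases List.mem_cons.mp hb with rfl | hb'
      · exact Or.inl rfl
      · exact Or.inr (Or.inl (hx b hb'))
    · rcases List.mem_cons.mp hb with rfl | hb'
      · exact Or.inr (Or.inr (hx a ha'))
      · exact ih ha' hb'

-- ---- tag positions (A-side) ----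

def pvTagAt (tags : List Int) (j : Nat) : Int := tags.getD j (-100)

def pvPosList (tags : List Int) (t : Int) : List Int :=
  (List.range tags.length).filterMap (fun j => if pvTagAt tags j = t then some (j : Int) else none)

theorem pvTagAt_append_lt (tags : List Int) (v : Int) {j : Nat} (h : j < tags.length) :
    pvTagAt (tags ++ [v]) j = pvTagAt tags j := by
  simp [pvTagAt, List.getD_eq_getElem?_getD, List.getElem?_append_left h]

theorem pvTagAt_append_self (tags : List Int) (v : Int) :
    pvTagAt (tags ++ [v]) tags.length = v := by
  simp [pvTagAt, List.getD_eq_getElem?_getD]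

theorem pvMem_posList {tags : List Int} {t x : Int} :
    x ∈ pvPosList tags t ↔ ∃ j : Nat, j < tags.length ∧ x = (j : Int) ∧ pvTagAt tags j = t := by
  simp only [pvPosList, List.mem_filterMap, List.mem_range]
  constructor
  · rintro ⟨j, hj, hsome⟩
    by_cases h : pvTagAt tags j = t
    · simp [h] at hsome; exact ⟨j, hj, hsome.symm, h⟩
    · simp [h] at hsome
  · rintro ⟨j, hj, rfl, h⟩; exact ⟨j, hj, by simp [h]⟩

theorem pvPosList_append (tags : List Int) (v t : Int) :
    pvPosList (tags ++ [v]) t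
      = pvPosList tags t ++ (if v = t then [(tags.length : Int)] else []) := by
  unfold pvPosList
  rw [List.length_append, List.length_singleton, List.range_succ, List.filterMap_append]
  congr 1
  · exact List.filterMap_congr (fun j hj => by
      rw [pvTagAt_append_lt tags v (List.mem_range.mp hj)])
  · simp only [List.filterMap_cons, List.filterMap_nil, pvTagAt_append_self]
    by_cases hv : v = t
    · rw [if_pos hv, if_pos hv]
    · rw [if_neg hv, if_neg hv]

theorem pvPosList_append_ne (tags : List Int) {v t : Int} (h : t ≠ v) :
    pvPosList (tags ++ [v]) t = pvPosList tags t := by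
  rw [pvPosList_append, if_neg (fun hv => h hv.symm), List.append_nil]

theorem pvPosList_nil {tags : List Int} {t : Int}
    (h : ∀ j : Nat, j < tags.length → pvTagAt tags j ≠ t) : pvPosList tags t = [] := by
  simp only [pvPosList, List.filterMap_eq_nil_iff]
  intro j hj
  simp [h j (List.mem_range.mp hj)]

-- ---- the ghost step of B's matching loop (open-position stack plus pair list); B's real
-- ---- fold carries the dict instead of the pair list — pvWalk below relates the two ----

def pvMatchStep (st : Option (List Int × List (Int × Int))) (p : Int × Char) :
    Option (List Int × List (Int × Int)) :=
  match st with
  | none => none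
  | some (stack, pairs) =>
    if p.2 = '(' then some (p.1 :: stack, pairs)
    else if p.2 = ')' then
      match stack with
      | [] => none
      | a :: rest => some (rest, pairs ++ [(a, p.1)])
    else some (stack, pairs)

-- ---- the joint loop invariant of A's tagging pass and the ghost matching pass ----

def pvInv (bn : Int) (stA : List Int) (tags : List Int) (stB : List Int)
    (prs : List (Int × Int)) (ids : List Int) : Prop :=
  0 ≤ bn ∧
  stA.Pairwise (· > ·) ∧ (∀ t ∈ stA, 0 ≤ t ∧ t < bn) ∧
  List.Forall₂ (fun (pos : Int) (t : Int) => pvPosList tags t = [pos]) stB stA ∧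
  List.Forall₂ (fun (pr : Int × Int) (t : Int) =>
      0 ≤ t ∧ t < bn ∧ pvPosList tags t = [pr.1, pr.2]) prs ids ∧
  (∀ t : Int, 0 ≤ t → t < bn → t ∈ stA ∨ t ∈ ids) ∧
  (∀ j : Nat, j < tags.length →
      pvTagAt tags j = -100 ∨ (0 ≤ pvTagAt tags j ∧ pvTagAt tags j < bn))

theorem pvForall₂_keep_st {tags : List Int} {v : Int} {stB stA : List Int}
    (h : List.Forall₂ (fun (pos : Int) (t : Int) => pvPosList tags t = [pos]) stB stA)
    (hne : ∀ t ∈ stA, t ≠ v) :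
    List.Forall₂ (fun (pos : Int) (t : Int) => pvPosList (tags ++ [v]) t = [pos]) stB stA := by
  induction h with
  | nil => exact List.Forall₂.nil
  | @cons a b _ _ hr _ ih =>
    exact List.Forall₂.cons
      (by rw [pvPosList_append_ne tags (hne b List.mem_cons_self)]; exact hr)
      (ih (fun t ht => hne t (List.mem_cons_of_mem _ ht)))

theorem pvForall₂_keep_prs {tags : List Int} {v bn : Int} {prs : List (Int × Int)}
    {ids : List Int}
    (h : List.Forall₂ (fun (pr : Int × Int) (t : Int) =>
        0 ≤ t ∧ t < bn ∧ pvPosList tags t = [pr.1, pr.2]) prs ids)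
    (hne : ∀ t ∈ ids, t ≠ v) :
    List.Forall₂ (fun (pr : Int × Int) (t : Int) =>
        0 ≤ t ∧ t < bn ∧ pvPosList (tags ++ [v]) t = [pr.1, pr.2]) prs ids := by
  induction h with
  | nil => exact List.Forall₂.nil
  | @cons a b _ _ hr _ ih =>
    exact List.Forall₂.cons
      ⟨hr.1, hr.2.1, by rw [pvPosList_append_ne tags (hne b List.mem_cons_self)]; exact hr.2.2⟩
      (ih (fun t ht => hne t (List.mem_cons_of_mem _ ht)))

theorem pvInv_step_open {bn : Int} {stA tags stB : List Int} {prs : List (Int × Int)}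
    {ids : List Int} (h : pvInv bn stA tags stB prs ids) :
    pvInv (bn + 1) (bn :: stA) (tags ++ [bn]) ((tags.length : Int) :: stB) prs ids := by
  obtain ⟨h0, h1, h2, h3, h4, h5, h6⟩ := h
  have hnew : pvPosList tags bn = [] :=
    pvPosList_nil (fun j hj => by rcases h6 j hj with hm | ⟨_, hlt⟩ <;> omega)
  have hidbound : ∀ t ∈ ids, t ≠ bn := by
    intro t ht
    rcases pvForall₂_mem_right h4 ht with ⟨pr, _, _, hlt, _⟩
    omega
  refine ⟨by omega, ?_, ?_, ?_, ?_, ?_, ?_⟩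
  · exact List.pairwise_cons.mpr ⟨fun t ht => (h2 t ht).2, h1⟩
  · intro t ht
    rcases List.mem_cons.mp ht with rfl | ht'
    · exact ⟨h0, by omega⟩
    · exact ⟨(h2 t ht').1, by have := (h2 t ht').2; omega⟩
  · refine List.Forall₂.cons ?_ (pvForall₂_keep_st h3 (fun t ht => by have := (h2 t ht).2; omega))
    · rw [pvPosList_append, if_pos rfl, hnew, List.nil_append]
  · exact (pvForall₂_keep_prs h4 hidbound).imp (fun pr t hr => ⟨hr.1, by omega, hr.2.2⟩)
  · intro t ht0 htlt
    by_cases he : t = bn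
    · exact Or.inl (he ▸ List.mem_cons_self)
    · rcases h5 t ht0 (by omega) with hs | hi
      · exact Or.inl (List.mem_cons_of_mem _ hs)
      · exact Or.inr hi
  · intro j hj
    rw [List.length_append, List.length_singleton] at hj
    by_cases hlt : j < tags.length
    · rw [pvTagAt_append_lt tags bn hlt]
      rcases h6 j hlt with hm | ⟨ha, hb⟩
      · exact Or.inl hm
      · exact Or.inr ⟨ha, by omega⟩
    · have : j = tags.length := by omega
      subst this
      rw [pvTagAt_append_self]
      exact Or.inr ⟨h0, by omega⟩

theorem pvInv_step_other {bn : Int} {stA tags stB : List Int} {prs : List (Int × Int)}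
    {ids : List Int} (h : pvInv bn stA tags stB prs ids) :
    pvInv bn stA (tags ++ [(-100 : Int)]) stB prs ids := by
  obtain ⟨h0, h1, h2, h3, h4, h5, h6⟩ := h
  refine ⟨h0, h1, h2, ?_, ?_, h5, ?_⟩
  · exact pvForall₂_keep_st h3 (fun t ht => by have := (h2 t ht).1; omega)
  · exact pvForall₂_keep_prs h4 (fun t ht => by
      rcases pvForall₂_mem_right h4 ht with ⟨pr, _, h0', _, _⟩; omega)
  · intro j hj
    rw [List.length_append, List.length_singleton] at hj
    by_cases hlt : j < tags.length
    · rw [pvTagAt_append_lt tags _ hlt]; exact h6 j hlt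
    · have : j = tags.length := by omega
      subst this
      rw [pvTagAt_append_self]
      exact Or.inl rfl

theorem pvInv_step_close {bn t₀ pos₀ : Int} {stA tags stB : List Int} {prs : List (Int × Int)}
    {ids : List Int} (h : pvInv bn (t₀ :: stA) tags (pos₀ :: stB) prs ids) :
    pvInv bn stA (tags ++ [t₀]) stB (prs ++ [(pos₀, (tags.length : Int))]) (ids ++ [t₀]) := by
  obtain ⟨h0, h1, h2, h3, h4, h5, h6⟩ := h
  have hhead : pvPosList tags t₀ = [pos₀] := by
    cases h3 with
    | cons hr _ => exact hr
  have hth := h2 t₀ List.mem_cons_self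
  have hrest : ∀ t ∈ stA, t ≠ t₀ := by
    intro t ht he
    have := (List.pairwise_cons.mp h1).1 t ht
    omega
  have hids : ∀ t ∈ ids, t ≠ t₀ := by
    intro t ht he
    rcases pvForall₂_mem_right h4 ht with ⟨pr, _, _, _, hpl⟩
    rw [he, hhead] at hpl
    simp at hpl
  refine ⟨h0, (List.pairwise_cons.mp h1).2, fun t ht => h2 t (List.mem_cons_of_mem _ ht), ?_, ?_, ?_, ?_⟩
  · cases h3 with
    | cons _ htail => exact pvForall₂_keep_st htail hrest
  · refine List.rel_append (pvForall₂_keep_prs h4 hids)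
      (List.Forall₂.cons ⟨hth.1, hth.2, ?_⟩ List.Forall₂.nil)
    rw [pvPosList_append, if_pos rfl, hhead]
    rfl
  · intro t ht0 htlt
    rcases h5 t ht0 htlt with hs | hi
    · rcases List.mem_cons.mp hs with rfl | hs'
      · exact Or.inr (List.mem_append.mpr (Or.inr List.mem_cons_self))
      · exact Or.inl hs'
    · exact Or.inr (List.mem_append.mpr (Or.inl hi))
  · intro j hj
    rw [List.length_append, List.length_singleton] at hj
    by_cases hlt : j < tags.length
    · rw [pvTagAt_append_lt tags _ hlt]; exact h6 j hlt
    · have : j = tags.length := by omega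
      subst this
      rw [pvTagAt_append_self]
      exact Or.inr ⟨hth.1, hth.2⟩

theorem pvJoint (cs : List Char) : ∀ (bn : Int) (stA tags stB : List Int)
    (prs : List (Int × Int)) (ids : List Int),
    pvInv bn stA tags stB prs ids →
    (∀ k, k ≤ cs.length → (cs.take k).count ')' ≤ stA.length + (cs.take k).count '(') →
    ∃ bn' stA' tags' stB' prs' ids',
      cs.foldl solutionTag (some (bn, stA, tags)) = some (bn', stA', tags') ∧
      (PySem.List.enumerate cs (tags.length : Int)).foldl pvMatchStep (some (stB, prs))
        = some (stB', prs') ∧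
      pvInv bn' stA' tags' stB' prs' ids' ∧
      tags'.length = tags.length + cs.length ∧
      stA'.length + cs.count ')' = stA.length + cs.count '(' := by
  induction cs with
  | nil =>
    intro bn stA tags stB prs ids hInv _
    exact ⟨bn, stA, tags, stB, prs, ids, rfl, by simp [PySem.List.enumerate_nil], hInv,
      by simp, by simp⟩
  | cons c cs ih =>
    intro bn stA tags stB prs ids hInv hbal
    rw [PySem.List.enumerate_cons, List.foldl_cons, List.foldl_cons]
    by_cases hop : c = '('
    · subst hop
      have stepA : solutionTag (some (bn, stA, tags)) '('
          = some (bn + 1, bn :: stA, tags ++ [bn]) := by simp [solutionTag]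
      have stepB : pvMatchStep (some (stB, prs)) ((tags.length : Int), '(')
          = some ((tags.length : Int) :: stB, prs) := by simp [pvMatchStep]
      rw [stepA, stepB]
      have hbal' : ∀ k, k ≤ cs.length →
          (cs.take k).count ')' ≤ (bn :: stA).length + (cs.take k).count '(' := by
        intro k hk
        have h1 := hbal (k + 1) (by simp; omega)
        simp at h1
        simp [List.length_cons]
        omega
      obtain ⟨bn', stA', tags', stB', prs', ids', hA, hB, hI, hL, hC⟩ :=
        ih (bn + 1) (bn :: stA) (tags ++ [bn]) ((tags.length : Int) :: stB) prs ids
          (pvInv_step_open hInv) hbal'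
      refine ⟨bn', stA', tags', stB', prs', ids', hA, ?_, hI, ?_, ?_⟩
      · rw [← hB]
        congr 2
        simp
      · simp at hL ⊢; omega
      · simp at hC ⊢
        omega
    · by_cases hcl : c = ')'
      · subst hcl
        have hst : stA.length ≥ 1 := by
          have h1 := hbal 1 (by simp)
          simpa using h1
        obtain ⟨t₀, restA, rfl⟩ : ∃ t₀ restA, stA = t₀ :: restA := by
          cases stA with
          | nil => simp at hst
          | cons a l => exact ⟨a, l, rfl⟩
        obtain ⟨pos₀, restB, rfl⟩ : ∃ pos₀ restB, stB = pos₀ :: restB := by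
          have h3 := hInv.2.2.2.1
          cases h3 with
          | cons _ _ => exact ⟨_, _, rfl⟩
        have stepA : solutionTag (some (bn, t₀ :: restA, tags)) ')'
            = some (bn, restA, tags ++ [t₀]) := by simp [solutionTag]
        have stepB : pvMatchStep (some (pos₀ :: restB, prs)) ((tags.length : Int), ')')
            = some (restB, prs ++ [(pos₀, (tags.length : Int))]) := by simp [pvMatchStep]
        rw [stepA, stepB]
        have hbal' : ∀ k, k ≤ cs.length →
            (cs.take k).count ')' ≤ restA.length + (cs.take k).count '(' := by
          intro k hk
          have h1 := hbal (k + 1) (by simp; omega)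
          simp at h1
          omega
        obtain ⟨bn', stA', tags', stB', prs', ids', hA, hB, hI, hL, hC⟩ :=
          ih bn restA (tags ++ [t₀]) restB (prs ++ [(pos₀, (tags.length : Int))]) (ids ++ [t₀])
            (pvInv_step_close hInv) hbal'
        refine ⟨bn', stA', tags', stB', prs', ids', hA, ?_, hI, ?_, ?_⟩
        · rw [← hB]
          congr 2
          simp
        · simp at hL ⊢; omega
        · simp at hC ⊢
          omega
      · have stepA : solutionTag (some (bn, stA, tags)) c
            = some (bn, stA, tags ++ [-100]) := by simp [solutionTag, hop, hcl]
        have stepB : pvMatchStep (some (stB, prs)) ((tags.length : Int), c)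
            = some (stB, prs) := by simp [pvMatchStep, hop, hcl]
        rw [stepA, stepB]
        have hbal' : ∀ k, k ≤ cs.length →
            (cs.take k).count ')' ≤ stA.length + (cs.take k).count '(' := by
          intro k hk
          have h1 := hbal (k + 1) (by simp; omega)
          simpa [hop, hcl] using h1
        obtain ⟨bn', stA', tags', stB', prs', ids', hA, hB, hI, hL, hC⟩ :=
          ih bn stA (tags ++ [-100]) stB prs ids (pvInv_step_other hInv) hbal'
        refine ⟨bn', stA', tags', stB', prs', ids', hA, ?_, ?_, ?_, ?_⟩
        · rw [← hB]
          congr 2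
          simp
        · exact hI
        · simp at hL ⊢; omega
        · simp [hop, hcl] at hC ⊢
          omega

-- ---- combinations used by A: membership via the library lemma ----

theorem pvCombi_mem (bn : Int) (h0 : 0 ≤ bn) (c : List Int) :
    c ∈ (PySem.List.pyRange 0 bn 1).foldl
        (fun acc i => acc ++ PySem.List.combinations (PySem.List.pyRange 0 bn 1) (i + 1).toNat) []
      ↔ c.Sublist (PySem.List.pyRange 0 bn 1) ∧ c ≠ [] := by
  rw [PySem.List.foldl_append_eq_flatMap]
  simp only [List.nil_append, List.mem_flatMap, PySem.List.mem_combinations_iff,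
    PySem.List.mem_pyRange_one]
  constructor
  · rintro ⟨i, ⟨h0i, hib⟩, hsub, hlen⟩
    refine ⟨hsub, fun hnil => ?_⟩
    subst hnil
    simp at hlen
    omega
  · rintro ⟨hsub, hne⟩
    have hlen1 : 1 ≤ c.length := by
      cases c with
      | nil => exact absurd rfl hne
      | cons a l => simp
    have hlen2 : c.length ≤ bn.toNat := by
      have := hsub.length_le
      rwa [PySem.List.length_pyRange_one, Int.sub_zero] at this
    refine ⟨(c.length : Int) - 1, ⟨by omega, by omega⟩, hsub, by omega⟩

-- ---- positional deletion: the common value both programs compute per subset of pairs ----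

def pvFlat (q : List (Int × Int)) : List Int := q.flatMap (fun pr => [pr.1, pr.2])

def pvPairsIn (prs : List (Int × Int)) (i j : Int) : List (Int × Int) :=
  prs.filter (fun pr => decide (i ≤ pr.1 ∧ pr.2 < j))

-- characters of cs (whose first character has string position s) at positions in [i, j) not in D
def pvDel : List Char → Int → Int → Int → List Int → List Char
  | [], _, _, _, _ => []
  | c :: t, s, i, j, D => (if i ≤ s ∧ s < j ∧ s ∉ D then [c] else []) ++ pvDel t (s + 1) i j D

theorem pvDel_nil_of_le : ∀ (cs : List Char) (s i j : Int) (D : List Int), j ≤ i →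
    pvDel cs s i j D = [] := by
  intro cs
  induction cs with
  | nil => intro s i j D h; rfl
  | cons c t ih =>
    intro s i j D h
    simp only [pvDel, ih (s + 1) i j D h, List.append_nil]
    rw [if_neg (by omega)]

theorem pvDel_nil_of_ge : ∀ (cs : List Char) (s i j : Int) (D : List Int), j ≤ s →
    pvDel cs s i j D = [] := by
  intro cs
  induction cs with
  | nil => intro s i j D h; rfl
  | cons c t ih =>
    intro s i j D h
    simp only [pvDel, ih (s + 1) i j D (by omega), List.append_nil]
    rw [if_neg (by omega)]

theorem pvDel_split : ∀ (cs : List Char) (s i m j : Int) (D : List Int), i ≤ m → m ≤ j →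
    pvDel cs s i j D = pvDel cs s i m D ++ pvDel cs s m j D := by
  intro cs
  induction cs with
  | nil => intros; rfl
  | cons c t ih =>
    intro s i m j D h1 h2
    simp only [pvDel, ih (s + 1) i m j D h1 h2]
    by_cases hs : s < m
    · have he : (i ≤ s ∧ s < j ∧ s ∉ D) ↔ (i ≤ s ∧ s < m ∧ s ∉ D) := by
        constructor <;> rintro ⟨x1, x2, x3⟩ <;> exact ⟨x1, by omega, x3⟩
      rw [if_congr he rfl rfl, if_neg (show ¬(m ≤ s ∧ s < j ∧ s ∉ D) by rintro ⟨hc, -, -⟩; omega)]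
      simp [List.append_assoc]
    · have he : (i ≤ s ∧ s < j ∧ s ∉ D) ↔ (m ≤ s ∧ s < j ∧ s ∉ D) := by
        constructor <;> rintro ⟨x1, x2, x3⟩ <;> exact ⟨by omega, x2, x3⟩
      rw [if_congr he rfl rfl, if_neg (show ¬(i ≤ s ∧ s < m ∧ s ∉ D) by rintro ⟨-, hc, -⟩; omega),
        pvDel_nil_of_ge t (s + 1) i m D (by omega)]
      simp

theorem pvDel_congrD : ∀ (cs : List Char) (s i j : Int) (D D' : List Int),
    (∀ p : Int, i ≤ p → p < j → (p ∈ D ↔ p ∈ D')) →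
    pvDel cs s i j D = pvDel cs s i j D' := by
  intro cs
  induction cs with
  | nil => intros; rfl
  | cons c t ih =>
    intro s i j D D' h
    simp only [pvDel, ih (s + 1) i j D D' h]
    congr 1
    have he : (i ≤ s ∧ s < j ∧ s ∉ D) ↔ (i ≤ s ∧ s < j ∧ s ∉ D') := by
      constructor <;> rintro ⟨a, b, c2⟩
      · exact ⟨a, b, fun hm => c2 ((h s a b).mpr hm)⟩
      · exact ⟨a, b, fun hm => c2 ((h s a b).mp hm)⟩
    rw [if_congr he rfl rfl]

theorem pvDel_single : ∀ (cs : List Char) (s i : Int) (D : List Int),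
    pvDel cs s i (i + 1) D
      = if s ≤ i ∧ i < s + cs.length ∧ i ∉ D then [cs.getD (i - s).toNat ' '] else [] := by
  intro cs
  induction cs with
  | nil =>
    intro s i D
    rw [if_neg (by rintro ⟨a, b, -⟩; simp at b; omega)]
    rfl
  | cons c t ih =>
    intro s i D
    simp only [pvDel]
    rcases lt_trichotomy s i with hs | hs | hs
    · rw [if_neg (by rintro ⟨a, b, -⟩; omega), List.nil_append, ih (s + 1) i D]
      by_cases hc : i < s + 1 + t.length ∧ i ∉ D
      · rw [if_pos ⟨by omega, hc.1, hc.2⟩,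
          if_pos ⟨by omega, by simp only [List.length_cons]; push_cast; omega, hc.2⟩]
        have hn : (i - s).toNat = (i - (s + 1)).toNat + 1 := by omega
        rw [hn, List.getD_cons_succ]
      · rw [if_neg (by rintro ⟨-, b, c2⟩; exact hc ⟨by omega, c2⟩),
          if_neg (by rintro ⟨-, b, c2⟩; exact hc ⟨by simp only [List.length_cons] at b; push_cast at b; omega, c2⟩)]
    · subst hs
      rw [pvDel_nil_of_ge t (s + 1) s (s + 1) D (by omega), List.append_nil]
      by_cases hD : s ∈ D
      · rw [if_neg (by rintro ⟨-, -, c2⟩; exact c2 hD),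
          if_neg (by rintro ⟨-, -, c2⟩; exact c2 hD)]
      · rw [if_pos ⟨le_refl s, by omega, hD⟩,
          if_pos ⟨le_refl s, by simp only [List.length_cons]; push_cast; omega, hD⟩]
        simp
    · rw [if_neg (by rintro ⟨-, a, -⟩; omega),
        pvDel_nil_of_ge t (s + 1) i (i + 1) D (by omega),
        if_neg (by rintro ⟨a, -, -⟩; omega)]
      rfl

theorem pvDel_full : ∀ (cs : List Char) (s i j : Int), i ≤ s → s + cs.length ≤ j →
    pvDel cs s i j [] = cs := by
  intro cs
  induction cs with
  | nil => intros; rfl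
  | cons c t ih =>
    intro s i j h1 h2
    simp only [List.length_cons] at h2
    push_cast at h2
    simp only [pvDel, List.not_mem_nil, not_false_eq_true, and_true]
    rw [if_pos ⟨h1, by omega⟩, ih (s + 1) i j (by omega) (by omega)]
    rfl

theorem pvDel_length_le : ∀ (cs : List Char) (s i j : Int) (D : List Int),
    (pvDel cs s i j D).length ≤ cs.length := by
  intro cs
  induction cs with
  | nil => intros; simp [pvDel]
  | cons c t ih =>
    intro s i j D
    simp only [pvDel, List.length_append, List.length_cons]
    have := ih (s + 1) i j D
    split_ifs <;> simp <;> omega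

theorem pvDel_length_lt : ∀ (cs : List Char) (s i j : Int) (D : List Int) (p : Int),
    p ∈ D → i ≤ p → p < j → s ≤ p → p < s + cs.length →
    (pvDel cs s i j D).length < cs.length := by
  intro cs
  induction cs with
  | nil => intro s i j D p _ _ _ h4 h5; simp at h5; omega
  | cons c t ih =>
    intro s i j D p h1 h2 h3 h4 h5
    simp only [List.length_cons] at h5
    push_cast at h5
    simp only [pvDel, List.length_append, List.length_cons]
    by_cases hsp : s = p
    · subst hsp
      rw [if_neg (by rintro ⟨-, -, c2⟩; exact c2 h1)]
      have := pvDel_length_le t (s + 1) i j D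
      simp
      omega
    · have := ih (s + 1) i j D p h1 h2 h3 (by omega) (by omega)
      split_ifs <;> simp <;> omega

theorem pvDel_eq_filter : ∀ (cs : List Char) (s i j : Int) (D : List Int),
    pvDel cs s i j D = ((PySem.List.enumerate cs s).filter
        (fun p => decide (i ≤ p.1 ∧ p.1 < j ∧ p.1 ∉ D))).map (·.2) := by
  intro cs
  induction cs with
  | nil => intros; simp [pvDel, PySem.List.enumerate_nil]
  | cons c t ih =>
    intro s i j D
    rw [PySem.List.enumerate_cons, List.filter_cons]
    by_cases h : i ≤ s ∧ s < j ∧ s ∉ D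
    · simp only [pvDel, if_pos h, ih (s + 1) i j D]
      simp [h]
    · simp only [pvDel, if_neg h, ih (s + 1) i j D]
      simp [h]

-- ---- the structural invariant of the matching pass (over the processed prefix) ----

def pvStruct (pre : List Char) (stB : List Int) (prs : List (Int × Int)) : Prop :=
  stB.Pairwise (· > ·) ∧
  (∀ s ∈ stB, 0 ≤ s ∧ s < (pre.length : Int) ∧ pre.getD s.toNat ' ' = '(') ∧
  (∀ pr ∈ prs, 0 ≤ pr.1 ∧ pr.1 < pr.2 ∧ pr.2 < (pre.length : Int) ∧
      pre.getD pr.1.toNat ' ' = '(' ∧ pre.getD pr.2.toNat ' ' = ')') ∧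
  prs.Pairwise (fun pr pr' => pr.2 < pr'.2 ∧ (pr'.1 < pr.1 ∨ pr.2 < pr'.1)) ∧
  (∀ s ∈ stB, ∀ pr ∈ prs, pr.2 < s ∨ s < pr.1) ∧
  (∀ p : Nat, p < pre.length →
      (pre.getD p ' ' = '(' → (p : Int) ∈ stB ∨ ∃ pr ∈ prs, pr.1 = (p : Int)) ∧
      (pre.getD p ' ' = ')' → ∃ pr ∈ prs, pr.2 = (p : Int)))

theorem pvCharAt_append_lt (pre : List Char) (c : Char) {p : Nat} (h : p < pre.length) :
    (pre ++ [c]).getD p ' ' = pre.getD p ' ' := by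
  simp [List.getD_eq_getElem?_getD, List.getElem?_append_left h]

theorem pvCharAt_append_self (pre : List Char) (c : Char) :
    (pre ++ [c]).getD pre.length ' ' = c := by
  simp [List.getD_eq_getElem?_getD]

theorem pvStruct_open {pre : List Char} {stB : List Int} {prs : List (Int × Int)} {c : Char}
    (h : pvStruct pre stB prs) (hc : c = '(') :
    pvStruct (pre ++ [c]) ((pre.length : Int) :: stB) prs := by
  obtain ⟨h1, h2, h3, h4, h5, h6⟩ := h
  refine ⟨?_, ?_, ?_, h4, ?_, ?_⟩
  · exact List.pairwise_cons.mpr ⟨fun s hs => by have := (h2 s hs).2.1; omega, h1⟩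
  · intro s hs
    rcases List.mem_cons.mp hs with rfl | hs'
    · refine ⟨by positivity, by simp, ?_⟩
      rw [Int.toNat_natCast, pvCharAt_append_self, hc]
    · obtain ⟨a1, a2, a3⟩ := h2 s hs'
      refine ⟨a1, by simp; omega, ?_⟩
      rw [pvCharAt_append_lt pre c (by omega), a3]
  · intro pr hpr
    obtain ⟨a1, a2, a3, a4, a5⟩ := h3 pr hpr
    refine ⟨a1, a2, by simp; omega, ?_, ?_⟩
    · rw [pvCharAt_append_lt pre c (by omega), a4]
    · rw [pvCharAt_append_lt pre c (by omega), a5]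
  · intro s hs pr hpr
    rcases List.mem_cons.mp hs with rfl | hs'
    · have := (h3 pr hpr).2.2.1
      omega
    · exact h5 s hs' pr hpr
  · intro p hp
    rw [List.length_append, List.length_singleton] at hp
    by_cases hlt : p < pre.length
    · rw [pvCharAt_append_lt pre c hlt]
      refine ⟨fun hch => ?_, fun hch => (h6 p hlt).2 hch⟩
      rcases (h6 p hlt).1 hch with hm | hm
      · exact Or.inl (List.mem_cons_of_mem _ hm)
      · exact Or.inr hm
    · have hpe : p = pre.length := by omega
      subst hpe
      rw [pvCharAt_append_self]
      refine ⟨fun _ => Or.inl List.mem_cons_self, fun hch => ?_⟩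
      rw [hc] at hch
      exact absurd hch (by decide)

theorem pvStruct_other {pre : List Char} {stB : List Int} {prs : List (Int × Int)} {c : Char}
    (h : pvStruct pre stB prs) (hc1 : c ≠ '(') (hc2 : c ≠ ')') :
    pvStruct (pre ++ [c]) stB prs := by
  obtain ⟨h1, h2, h3, h4, h5, h6⟩ := h
  refine ⟨h1, ?_, ?_, h4, h5, ?_⟩
  · intro s hs
    obtain ⟨a1, a2, a3⟩ := h2 s hs
    refine ⟨a1, by simp; omega, ?_⟩
    rw [pvCharAt_append_lt pre c (by omega), a3]
  · intro pr hpr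
    obtain ⟨a1, a2, a3, a4, a5⟩ := h3 pr hpr
    refine ⟨a1, a2, by simp; omega, ?_, ?_⟩
    · rw [pvCharAt_append_lt pre c (by omega), a4]
    · rw [pvCharAt_append_lt pre c (by omega), a5]
  · intro p hp
    rw [List.length_append, List.length_singleton] at hp
    by_cases hlt : p < pre.length
    · rw [pvCharAt_append_lt pre c hlt]
      exact h6 p hlt
    · have hpe : p = pre.length := by omega
      subst hpe
      rw [pvCharAt_append_self]
      exact ⟨fun hch => absurd hch hc1, fun hch => absurd hch hc2⟩

theorem pvStruct_close {pre : List Char} {a : Int} {stB : List Int} {prs : List (Int × Int)}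
    {c : Char} (h : pvStruct pre (a :: stB) prs) (hc : c = ')') :
    pvStruct (pre ++ [c]) stB (prs ++ [(a, (pre.length : Int))]) := by
  obtain ⟨h1, h2, h3, h4, h5, h6⟩ := h
  have ha := h2 a List.mem_cons_self
  refine ⟨(List.pairwise_cons.mp h1).2, ?_, ?_, ?_, ?_, ?_⟩
  · intro s hs
    obtain ⟨a1, a2, a3⟩ := h2 s (List.mem_cons_of_mem _ hs)
    refine ⟨a1, by simp; omega, ?_⟩
    rw [pvCharAt_append_lt pre c (by omega), a3]
  · intro pr hpr
    rcases List.mem_append.mp hpr with hpr' | hpr'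
    · obtain ⟨a1, a2, a3, a4, a5⟩ := h3 pr hpr'
      refine ⟨a1, a2, by simp; omega, ?_, ?_⟩
      · rw [pvCharAt_append_lt pre c (by omega), a4]
      · rw [pvCharAt_append_lt pre c (by omega), a5]
    · rcases List.mem_singleton.mp hpr' with rfl
      refine ⟨ha.1, ha.2.1, by simp, ?_, ?_⟩
      · rw [pvCharAt_append_lt pre c (by omega), ha.2.2]
      · rw [Int.toNat_natCast, pvCharAt_append_self, hc]
  · rw [List.pairwise_append]
    refine ⟨h4, List.pairwise_singleton _ _, ?_⟩
    intro pr hpr pr' hpr'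
    rcases List.mem_singleton.mp hpr' with rfl
    have hsep := h5 a List.mem_cons_self pr hpr
    have := (h3 pr hpr).2.2.1
    exact ⟨by omega, by omega⟩
  · intro s hs pr hpr
    rcases List.mem_append.mp hpr with hpr' | hpr'
    · exact h5 s (List.mem_cons_of_mem _ hs) pr hpr'
    · rcases List.mem_singleton.mp hpr' with rfl
      have := (List.pairwise_cons.mp h1).1 s hs
      exact Or.inr (by simpa using this)
  · intro p hp
    rw [List.length_append, List.length_singleton] at hp
    by_cases hlt : p < pre.length
    · rw [pvCharAt_append_lt pre c hlt]
      constructor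
      · intro hch
        rcases (h6 p hlt).1 hch with hm | ⟨pr, hpr, hpre⟩
        · rcases List.mem_cons.mp hm with he | hm'
          · exact Or.inr ⟨(a, (pre.length : Int)), List.mem_append.mpr (Or.inr List.mem_cons_self),
              by simp [← he]⟩
          · exact Or.inl hm'
        · exact Or.inr ⟨pr, List.mem_append.mpr (Or.inl hpr), hpre⟩
      · intro hch
        rcases (h6 p hlt).2 hch with ⟨pr, hpr, hpre⟩
        exact ⟨pr, List.mem_append.mpr (Or.inl hpr), hpre⟩
    · have hpe : p = pre.length := by omega
      subst hpe
      rw [pvCharAt_append_self]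
      constructor
      · intro hch
        rw [hc] at hch
        exact absurd hch (by decide)
      · intro _
        exact ⟨(a, (pre.length : Int)), List.mem_append.mpr (Or.inr List.mem_cons_self), rfl⟩

theorem pvFoldNone (l : List (Int × Char)) : l.foldl pvMatchStep none = none := by
  induction l with
  | nil => rfl
  | cons x t ih => simpa [pvMatchStep] using ih

theorem pvWalk : ∀ (rest pre : List Char) (stB : List Int) (prs : List (Int × Int)),
    pvStruct pre stB prs →
    ∀ (stB' : List Int) (prs' : List (Int × Int)),
    (PySem.List.enumerate rest (pre.length : Int)).foldl pvMatchStep (some (stB, prs))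
      = some (stB', prs') →
    (PySem.List.enumerate rest (pre.length : Int)).foldl solutionAltMatch
        (some (stB, PySem.Dict.mk prs)) = some (stB', PySem.Dict.mk prs') ∧
    pvStruct (pre ++ rest) stB' prs' := by
  intro rest
  induction rest with
  | nil =>
    intro pre stB prs hS stB' prs' hfold
    rw [PySem.List.enumerate_nil, List.foldl_nil] at hfold ⊢
    obtain ⟨rfl, rfl⟩ : stB = stB' ∧ prs = prs' := by
      have := Option.some.inj hfold
      exact ⟨congrArg Prod.fst this, congrArg Prod.snd this⟩
    exact ⟨rfl, by simpa using hS⟩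
  | cons c rest ih =>
    intro pre stB prs hS stB' prs' hfold
    rw [PySem.List.enumerate_cons, List.foldl_cons] at hfold ⊢
    have hoff : (pre.length : Int) + 1 = (((pre ++ [c]).length : Nat) : Int) := by
      simp
    by_cases hop : c = '('
    · rw [show pvMatchStep (some (stB, prs)) ((pre.length : Int), c)
          = some ((pre.length : Int) :: stB, prs) by simp [pvMatchStep, hop]] at hfold
      rw [show solutionAltMatch (some (stB, PySem.Dict.mk prs)) ((pre.length : Int), c)
          = some ((pre.length : Int) :: stB, PySem.Dict.mk prs) by
        simp [solutionAltMatch, hop]]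
      rw [hoff] at hfold ⊢
      have := ih (pre ++ [c]) ((pre.length : Int) :: stB) prs (pvStruct_open hS hop) stB' prs'
        (by simpa using hfold)
      refine ⟨by simpa using this.1, by simpa using this.2⟩
    · by_cases hcl : c = ')'
      · cases stB with
        | nil =>
          rw [show pvMatchStep (some ([], prs)) ((pre.length : Int), c) = none by
            simp [pvMatchStep, hcl], pvFoldNone] at hfold
          cases hfold
        | cons a stB0 =>
          rw [show pvMatchStep (some (a :: stB0, prs)) ((pre.length : Int), c)
              = some (stB0, prs ++ [(a, (pre.length : Int))]) by
            simp [pvMatchStep, hcl]] at hfold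
          have hnc : (PySem.Dict.mk prs).contains a = false := by
            rw [PySem.Dict.contains_mk]
            rw [List.any_eq_false]
            intro pr hpr
            have := hS.2.2.2.2.1 a List.mem_cons_self pr hpr
            have h12 := (hS.2.2.1 pr hpr).2.1
            simp only [beq_iff_eq]
            omega
          rw [show solutionAltMatch (some (a :: stB0, PySem.Dict.mk prs)) ((pre.length : Int), c)
              = some (stB0, PySem.Dict.mk (prs ++ [(a, (pre.length : Int))])) by
            simp only [solutionAltMatch, hcl]
            simp [PySem.Dict.insert, hnc]]
          rw [hoff] at hfold ⊢
          have := ih (pre ++ [c]) stB0 (prs ++ [(a, (pre.length : Int))])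
            (by simpa using pvStruct_close hS hcl) stB' prs' (by simpa using hfold)
          refine ⟨by simpa using this.1, by simpa using this.2⟩
      · rw [show pvMatchStep (some (stB, prs)) ((pre.length : Int), c) = some (stB, prs) by
          simp [pvMatchStep, hop, hcl]] at hfold
        rw [show solutionAltMatch (some (stB, PySem.Dict.mk prs)) ((pre.length : Int), c)
            = some (stB, PySem.Dict.mk prs) by simp [solutionAltMatch, hop, hcl]]
        rw [hoff] at hfold ⊢
        have := ih (pre ++ [c]) stB prs (pvStruct_other hS hop hcl) stB' prs'
          (by simpa using hfold)
        refine ⟨by simpa using this.1, by simpa using this.2⟩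

-- ---- dict lookup on the final pair list ----

theorem pvGet_mk : ∀ (prs : List (Int × Int)), (prs.map (·.1)).Nodup →
    ∀ (a b : Int), ((PySem.Dict.mk prs).get? a = some b ↔ (a, b) ∈ prs) := by
  intro prs
  induction prs with
  | nil => intro _ a b; simp [PySem.Dict.get?]
  | cons hd tl ih =>
    intro hnd a b
    rw [List.map_cons, List.nodup_cons] at hnd
    rw [show (PySem.Dict.mk (hd :: tl)) = ({ items := (hd.1, hd.2) :: tl } : PySem.Dict Int Int)
        by rfl, PySem.Dict.get?_mk_cons]
    by_cases he : hd.1 = a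
    · rw [if_pos (by simpa using he)]
      constructor
      · intro hs
        have : b = hd.2 := by simpa using hs.symm
        subst this
        subst he
        exact List.mem_cons_self
      · intro hm
        rcases List.mem_cons.mp hm with rfl | hm'
        · rfl
        · exact absurd (List.mem_map.mpr ⟨(a, b), hm', he ▸ rfl⟩) (he ▸ hnd.1)
    · rw [if_neg (by simpa using he)]
      rw [show ({ items := tl } : PySem.Dict Int Int) = PySem.Dict.mk tl by rfl, ih hnd.2 a b]
      constructor
      · exact fun hm => List.mem_cons_of_mem _ hm
      · intro hm
        rcases List.mem_cons.mp hm with rfl | hm'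
        · exact absurd rfl he
        · exact hm'

-- ---- consequences of the structural invariant ----

theorem pvPrs_nodup {prs : List (Int × Int)}
    (hpw : prs.Pairwise (fun pr pr' => pr.2 < pr'.2 ∧ (pr'.1 < pr.1 ∨ pr.2 < pr'.1))) :
    prs.Nodup :=
  hpw.imp (fun h he => absurd (he ▸ h.1) (lt_irrefl _))

theorem pvOpens_nodup {prs : List (Int × Int)}
    (hpr : ∀ pr ∈ prs, pr.1 < pr.2)
    (hpw : prs.Pairwise (fun pr pr' => pr.2 < pr'.2 ∧ (pr'.1 < pr.1 ∨ pr.2 < pr'.1))) :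
    (prs.map (·.1)).Nodup := by
  rw [List.Nodup, List.pairwise_map]
  refine List.Pairwise.imp_of_mem ?_ hpw
  intro a b ha hb hr
  have h1 := hpr a ha
  have h2 := hpr b hb
  rcases hr.2 with h | h <;> omega

theorem pvClose_inj {prs : List (Int × Int)}
    (hpw : prs.Pairwise (fun pr pr' => pr.2 < pr'.2 ∧ (pr'.1 < pr.1 ∨ pr.2 < pr'.1)))
    {a b : Int × Int} (ha : a ∈ prs) (hb : b ∈ prs) (h : a.2 = b.2) : a = b := by
  rcases pvPairwise_of_mem hpw ha hb with he | hr | hr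
  · exact he
  · exact absurd (h ▸ hr.1) (lt_irrefl _)
  · exact absurd (h ▸ hr.1) (lt_irrefl _)

theorem pvNoCross {prs : List (Int × Int)}
    (hpw : prs.Pairwise (fun pr pr' => pr.2 < pr'.2 ∧ (pr'.1 < pr.1 ∨ pr.2 < pr'.1)))
    {pr pr' : Int × Int} (h1 : pr ∈ prs) (h2 : pr' ∈ prs) (hlt : pr.1 < pr'.1) :
    pr'.2 < pr.2 ∨ pr.2 < pr'.1 := by
  rcases pvPairwise_of_mem hpw h1 h2 with he | hr | hr
  · exact absurd (he ▸ hlt) (lt_irrefl _)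
  · rcases hr.2 with h | h
    · omega
    · exact Or.inr h
  · rcases hr.2 with h | h
    · exact Or.inl hr.1
    · omega

theorem pvFlat_append (q1 q2 : List (Int × Int)) :
    pvFlat (q1 ++ q2) = pvFlat q1 ++ pvFlat q2 := by
  simp [pvFlat]

theorem pvMem_flat {p : Int} {q : List (Int × Int)} :
    p ∈ pvFlat q ↔ ∃ pr ∈ q, p = pr.1 ∨ p = pr.2 := by
  simp only [pvFlat, List.mem_flatMap, List.mem_cons, List.not_mem_nil, or_false]

theorem pvFlat_bounds {prs : List (Int × Int)} {i j : Int}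
    (hpr : ∀ pr ∈ prs, pr.1 < pr.2) {q : List (Int × Int)}
    (hq : q.Sublist (pvPairsIn prs i j)) :
    ∀ p ∈ pvFlat q, i ≤ p ∧ p < j := by
  intro p hp
  rcases pvMem_flat.mp hp with ⟨pr, hprq, hval⟩
  have hmem := hq.subset hprq
  rw [pvPairsIn, List.mem_filter, decide_eq_true_eq] at hmem
  have := hpr pr hmem.1
  rcases hval with rfl | rfl <;> omega

theorem pvFilter_split3 {α : Type} (l : List α) (f : α → Int) (k : Int) (P : α → Bool) :
    l.Pairwise (fun a b => f a < f b) →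
    l.filter P = l.filter (fun a => P a && decide (f a < k))
      ++ l.filter (fun a => P a && decide (f a = k))
      ++ l.filter (fun a => P a && decide (k < f a)) := by
  induction l with
  | nil => intro _; simp
  | cons a t ih =>
    intro hl
    have hpa := (List.pairwise_cons.mp hl).1
    have ih' := ih (List.pairwise_cons.mp hl).2
    rcases lt_trichotomy (f a) k with h | h | h
    · simp only [List.filter_cons, h, decide_true, Bool.and_true]
      rw [ih']
      by_cases hP : P a <;> simp [hP, show ¬(f a = k) by omega, show ¬(k < f a) by omega]
    · have ht : ∀ b ∈ t, k < f b := fun b hb => by have := hpa b hb; omega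
      have e1 : t.filter (fun x => P x && decide (f x < k)) = [] :=
        List.filter_eq_nil_iff.mpr (fun b hb => by simp [show ¬(f b < k) by have := ht b hb; omega])
      have e2 : t.filter (fun x => P x && decide (f x = k)) = [] :=
        List.filter_eq_nil_iff.mpr (fun b hb => by simp [show ¬(f b = k) by have := ht b hb; omega])
      have e3 : t.filter (fun x => P x && decide (k < f x)) = t.filter P :=
        List.filter_congr (fun b hb => by simp [ht b hb])
      simp only [List.filter_cons, h, decide_true, Bool.and_true, e1, e2, e3]
      by_cases hP : P a <;> simp [hP]
    · have ht : ∀ b ∈ t, k < f b := fun b hb => by have := hpa b hb; omega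
      have e1 : t.filter (fun x => P x && decide (f x < k)) = [] :=
        List.filter_eq_nil_iff.mpr (fun b hb => by simp [show ¬(f b < k) by have := ht b hb; omega])
      have e2 : t.filter (fun x => P x && decide (f x = k)) = [] :=
        List.filter_eq_nil_iff.mpr (fun b hb => by simp [show ¬(f b = k) by have := ht b hb; omega])
      have e3 : t.filter (fun x => P x && decide (k < f x)) = t.filter P :=
        List.filter_congr (fun b hb => by simp [ht b hb])
      simp only [List.filter_cons, e1, e2, e3]
      by_cases hP : P a <;>
        simp [hP, show ¬(f a < k) by omega, show ¬(f a = k) by omega, h]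

theorem pvFilter_eq_singleton {α : Type} {l : List α} {a : α} {P : α → Bool} :
    l.Nodup → a ∈ l → (∀ x ∈ l, P x = true ↔ x = a) → l.filter P = [a] := by
  induction l with
  | nil => intro _ ha; cases ha
  | cons hd0 t ih =>
    intro hnd hmem hchar
    rw [List.nodup_cons] at hnd
    rcases List.mem_cons.mp hmem with rfl | hmem'
    · rw [List.filter_cons, if_pos ((hchar _ List.mem_cons_self).mpr rfl)]
      have : t.filter P = [] := List.filter_eq_nil_iff.mpr (fun b hb => by
        intro hPb
        exact hnd.1 ((hchar b (List.mem_cons_of_mem _ hb)).mp hPb ▸ hb))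
      rw [this]
    · have hne : P hd0 ≠ true := by
        intro hPh
        have := (hchar hd0 List.mem_cons_self).mp hPh
        subst this
        exact hnd.1 hmem'
      rw [List.filter_cons, if_neg hne, ih hnd.2 hmem'
        (fun x hx => hchar x (List.mem_cons_of_mem _ hx))]

-- ---- the characterisation of B's recursive generator ----

theorem pvOpen_inj {prs : List (Int × Int)}
    (hlt12 : ∀ pr ∈ prs, pr.1 < pr.2)
    (hpw : prs.Pairwise (fun pr pr' => pr.2 < pr'.2 ∧ (pr'.1 < pr.1 ∨ pr.2 < pr'.1)))
    {a b : Int × Int} (ha : a ∈ prs) (hb : b ∈ prs) (h : a.1 = b.1) : a = b := by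
  have h1 := hlt12 a ha
  have h2 := hlt12 b hb
  rcases pvPairwise_of_mem hpw ha hb with he | hr | hr
  · exact he
  · rcases hr.2 with hx | hx <;> omega
  · rcases hr.2 with hx | hx <;> omega

theorem pvSeg_mem (cs : List Char) (prs : List (Int × Int)) (hG : pvStruct cs [] prs) :
    ∀ (fuel : Nat) (p j : Int) (out : PySem.Set (List Char)), 0 ≤ p → j ≤ (cs.length : Int) →
    j - p ≤ (fuel : Int) →
    (∀ pr ∈ prs, p ≤ pr.1 → pr.1 < j → pr.2 < j) →
    ∀ x, x ∈ solutionSeg cs (PySem.Dict.mk prs) fuel p j out ↔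
      ∃ u ∈ out, ∃ q, q.Sublist (pvPairsIn prs p j) ∧ x = u ++ pvDel cs 0 p j (pvFlat q) := by
  obtain ⟨-, -, h3, h4, -, h6⟩ := hG
  have hlt12 : ∀ pr ∈ prs, pr.1 < pr.2 := fun pr h => (h3 pr h).2.1
  have hbase : ∀ (p j : Int), j ≤ p → ∀ (out : PySem.Set (List Char)) (x : List Char),
      (x ∈ out ↔
        ∃ u ∈ out, ∃ q, q.Sublist (pvPairsIn prs p j) ∧ x = u ++ pvDel cs 0 p j (pvFlat q)) := by
    intro p j hjp out x
    have hpairs : pvPairsIn prs p j = [] := by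
      rw [pvPairsIn, List.filter_eq_nil_iff]
      intro pr hpr
      have := hlt12 pr hpr
      simp only [decide_eq_true_eq, not_and]
      omega
    rw [hpairs]
    constructor
    · intro hx
      exact ⟨x, hx, [], List.Sublist.refl [],
        by rw [pvDel_nil_of_le cs 0 p j _ hjp, List.append_nil]⟩
    · rintro ⟨u, hu, q, hq, rfl⟩
      rw [List.sublist_nil] at hq
      subst hq
      rw [pvDel_nil_of_le cs 0 p j _ hjp, List.append_nil]
      exact hu
  intro fuel
  induction fuel with
  | zero =>
    intro p j out h0p hjn hfuel hSeg x
    rw [solutionSeg]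
    exact hbase p j (by omega) out x
  | succ fuel ih =>
    intro p j out h0p hjn hfuel hSeg x
    rw [solutionSeg]
    by_cases hij : j ≤ p
    · rw [if_pos hij]; exact hbase p j hij out x
    · rw [if_neg hij]
      have hin : p < (cs.length : Int) := by omega
      show x ∈ (if PySem.List.pyGetD cs p ' ' = '(' then _ else _) ↔ _
      rw [PySem.List.pyGetD_of_nonneg cs ' ' h0p]
      by_cases hch : cs.getD p.toNat ' ' = '('
      · rw [if_pos hch]
        obtain ⟨⟨o0, k⟩, hpr0, hopen⟩ : ∃ pr ∈ prs, pr.1 = p := by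
          have hcv := (h6 p.toNat (by omega)).1
          rw [show ((p.toNat : Nat) : Int) = p by omega] at hcv
          rcases hcv hch with habs | ⟨pr, hm, he⟩
          · cases habs
          · exact ⟨pr, hm, he⟩
        simp only at hopen
        subst hopen
        have hb := h3 (o0, k) hpr0
        simp only at hb
        have hkj : k < j := hSeg (o0, k) hpr0 (le_refl _) (by omega)
        have hik : o0 < k := hb.2.1
        have hget : (PySem.Dict.mk prs).get? o0 = some k :=
          (pvGet_mk prs (pvOpens_nodup hlt12 h4) o0 k).mpr hpr0
        rw [hget]
        have hSegIn : ∀ pr ∈ prs, o0 + 1 ≤ pr.1 → pr.1 < k → pr.2 < k := by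
          intro pr hpr hge hlt
          rcases pvNoCross h4 hpr0 hpr (by simpa using (by omega : o0 < pr.1)) with h | h
          · simpa using h
          · simp only at h; omega
        have hInner := ih (o0 + 1) k (PySem.Set.ofList [[]]) (by omega) (by omega) (by omega)
          hSegIn
        set U : PySem.Set (List Char) := PySem.Set.union
            (PySem.Set.ofList (out.flatMap (fun a =>
              (solutionSeg cs (PySem.Dict.mk prs) fuel (o0 + 1) k
                (PySem.Set.ofList [[]])).map (fun b => a ++ b))))
            (PySem.Set.ofList (out.flatMap (fun a =>
              (solutionSeg cs (PySem.Dict.mk prs) fuel (o0 + 1) k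
                (PySem.Set.ofList [[]])).map (fun b => a ++ '(' :: b ++ [')'])))) with hU
        have hRe := ih (k + 1) j U (by omega) hjn (by omega)
          (fun pr hpr a b => hSeg pr hpr (by omega) b)
        have hUmem : ∀ u' : List Char, u' ∈ U ↔
            (∃ a ∈ out, ∃ q1, q1.Sublist (pvPairsIn prs (o0 + 1) k) ∧
              (u' = a ++ pvDel cs 0 (o0 + 1) k (pvFlat q1) ∨
               u' = a ++ '(' :: pvDel cs 0 (o0 + 1) k (pvFlat q1) ++ [')'])) := by
          intro u'
          rw [hU, PySem.Set.mem_union, PySem.Set.mem_ofList, PySem.Set.mem_ofList]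
          simp only [List.mem_flatMap, List.mem_map]
          constructor
          · rintro (⟨a, ha, b, hbm, rfl⟩ | ⟨a, ha, b, hbm, rfl⟩)
            · rcases (hInner b).mp hbm with ⟨u0, hu0, q1, hq1, rfl⟩
              have hu0' : u0 = [] := by simpa using hu0
              subst hu0'
              exact ⟨a, ha, q1, hq1, Or.inl (by simp)⟩
            · rcases (hInner b).mp hbm with ⟨u0, hu0, q1, hq1, rfl⟩
              have hu0' : u0 = [] := by simpa using hu0
              subst hu0'
              exact ⟨a, ha, q1, hq1, Or.inr (by simp)⟩
          · rintro ⟨a, ha, q1, hq1, (rfl | rfl)⟩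
            · exact Or.inl ⟨a, ha, _,
                (hInner _).mpr ⟨[], by simp, q1, hq1, by simp⟩, rfl⟩
            · exact Or.inr ⟨a, ha, _,
                (hInner _).mpr ⟨[], by simp, q1, hq1, by simp⟩, rfl⟩
        have hdec : pvPairsIn prs o0 j
            = pvPairsIn prs (o0 + 1) k ++ [(o0, k)] ++ pvPairsIn prs (k + 1) j := by
          have hsplit := pvFilter_split3 prs (fun pr => pr.2) k
            (fun pr => decide (o0 ≤ pr.1 ∧ pr.2 < j)) (h4.imp (fun h => h.1))
          rw [pvPairsIn, hsplit]
          congr 1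
          congr 1
          · apply List.filter_congr
            intro pr hpr
            have h12 := hlt12 pr hpr
            rw [← Bool.decide_and]
            apply decide_eq_decide.mpr
            constructor
            · rintro ⟨⟨hge, hltj⟩, hltk⟩
              replace hltk : pr.2 < k := hltk
              refine ⟨?_, hltk⟩
              rcases eq_or_lt_of_le hge with he | hlt'
              · exfalso
                have := pvOpen_inj hlt12 h4 hpr hpr0 (by simpa using he.symm)
                rw [this] at hltk
                exact absurd hltk (lt_irrefl k)
              · omega
            · rintro ⟨hge, hltk⟩
              replace hltk : pr.2 < k := hltk
              exact ⟨⟨by omega, by omega⟩, show pr.2 < k from hltk⟩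
          · apply pvFilter_eq_singleton (pvPrs_nodup h4) hpr0
            intro pr hpr
            rw [Bool.and_eq_true, decide_eq_true_eq, decide_eq_true_eq]
            constructor
            · rintro ⟨⟨hge, hltj⟩, he⟩
              exact pvClose_inj h4 hpr hpr0 (by simpa using he)
            · rintro rfl
              exact ⟨⟨le_refl _, by simpa using hkj⟩, rfl⟩
          · apply List.filter_congr
            intro pr hpr
            have h12 := hlt12 pr hpr
            rw [← Bool.decide_and]
            apply decide_eq_decide.mpr
            constructor
            · rintro ⟨⟨hge, hltj⟩, hgtk⟩
              replace hgtk : k < pr.2 := hgtk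
              refine ⟨?_, hltj⟩
              have hne : pr.1 ≠ o0 := by
                intro he
                have := pvOpen_inj hlt12 h4 hpr hpr0 (by simpa using he)
                rw [this] at hgtk
                exact absurd hgtk (lt_irrefl k)
              rcases pvNoCross h4 hpr0 hpr (by simpa using (by omega : o0 < pr.1)) with h | h
              · replace h : pr.2 < k := h
                omega
              · replace h : k < pr.1 := h
                omega
            · rintro ⟨hge, hltj⟩
              have h12' := hlt12 pr hpr
              exact ⟨⟨by omega, hltj⟩, show k < pr.2 by omega⟩
        have hval : ∀ q1 q0 q2 : List (Int × Int),
            q1.Sublist (pvPairsIn prs (o0 + 1) k) → (q0 = [] ∨ q0 = [(o0, k)]) →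
            q2.Sublist (pvPairsIn prs (k + 1) j) →
            pvDel cs 0 o0 j (pvFlat (q1 ++ (q0 ++ q2)))
              = (if q0 = [] then ['('] else []) ++ pvDel cs 0 (o0 + 1) k (pvFlat q1)
                ++ ((if q0 = [] then [')'] else []) ++ pvDel cs 0 (k + 1) j (pvFlat q2)) := by
          intro q1 q0 q2 hq1 hq0 hq2
          have hB1 := pvFlat_bounds hlt12 hq1
          have hB2 := pvFlat_bounds hlt12 hq2
          have hmemD : ∀ p' : Int, p' ∈ pvFlat (q1 ++ (q0 ++ q2)) ↔
              (p' ∈ pvFlat q1 ∨ p' ∈ pvFlat q0 ∨ p' ∈ pvFlat q2) := by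
            intro p'
            rw [pvFlat_append, pvFlat_append]
            simp [List.mem_append]
          have hq0mem : ∀ p' : Int, p' ∈ pvFlat q0 ↔ (q0 ≠ [] ∧ (p' = o0 ∨ p' = k)) := by
            rcases hq0 with rfl | rfl <;> simp [pvFlat]
          set D := pvFlat (q1 ++ (q0 ++ q2)) with hDdef
          have e1 : pvDel cs 0 o0 (o0 + 1) D = (if q0 = [] then ['('] else []) := by
            rw [pvDel_single cs 0 o0 D]
            rcases hq0 with rfl | rfl
            · have hnotin : o0 ∉ D := by
                intro hm
                rcases (hmemD o0).mp hm with h | h | h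
                · have := hB1 o0 h; omega
                · simp [pvFlat] at h
                · have := hB2 o0 h; omega
              rw [if_pos ⟨by omega, by omega, hnotin⟩, if_pos rfl]
              simp only [Int.sub_zero]
              rw [hch]
            · have hne : ¬(0 ≤ o0 ∧ o0 < 0 + (cs.length : Int) ∧ o0 ∉ D) := by
                rintro ⟨-, -, hnot⟩
                exact hnot ((hmemD o0).mpr (Or.inr (Or.inl (by simp [pvFlat]))))
              rw [if_neg hne, if_neg (by simp)]
          have e2 : pvDel cs 0 (o0 + 1) k D = pvDel cs 0 (o0 + 1) k (pvFlat q1) := by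
            apply pvDel_congrD
            intro p' hp1 hp2
            rw [hmemD p']
            constructor
            · rintro (h | h | h)
              · exact h
              · rcases ((hq0mem p').mp h).2 with rfl | rfl <;> omega
              · have := hB2 p' h; omega
            · exact fun h => Or.inl h
          have e3 : pvDel cs 0 k (k + 1) D = (if q0 = [] then [')'] else []) := by
            rw [pvDel_single cs 0 k D]
            rcases hq0 with rfl | rfl
            · have hnotin : k ∉ D := by
                intro hm
                rcases (hmemD k).mp hm with h | h | h
                · have := hB1 k h; omega
                · simp [pvFlat] at h
                · have := hB2 k h; omega
              rw [if_pos ⟨by omega, by omega, hnotin⟩, if_pos rfl]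
              simp only [Int.sub_zero]
              rw [hb.2.2.2.2]
            · have hne : ¬(0 ≤ k ∧ k < 0 + (cs.length : Int) ∧ k ∉ D) := by
                rintro ⟨-, -, hnot⟩
                exact hnot ((hmemD k).mpr (Or.inr (Or.inl (by simp [pvFlat]))))
              rw [if_neg hne, if_neg (by simp)]
          have e4 : pvDel cs 0 (k + 1) j D = pvDel cs 0 (k + 1) j (pvFlat q2) := by
            apply pvDel_congrD
            intro p' hp1 hp2
            rw [hmemD p']
            constructor
            · rintro (h | h | h)
              · have := hB1 p' h; omega
              · rcases ((hq0mem p').mp h).2 with rfl | rfl <;> omega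
              · exact h
            · exact fun h => Or.inr (Or.inr h)
          rw [pvDel_split cs 0 o0 (o0 + 1) j D (by omega) (by omega),
              pvDel_split cs 0 (o0 + 1) k j D (by omega) (by omega),
              pvDel_split cs 0 k (k + 1) j D (by omega) (by omega),
              e1, e2, e3, e4]
          simp [List.append_assoc]
        refine Iff.trans (hRe x) ?_
        constructor
        · rintro ⟨u', hu', q2, hq2, rfl⟩
          rcases (hUmem u').mp hu' with ⟨a, ha, q1, hq1, (rfl | rfl)⟩
          · refine ⟨a, ha, q1 ++ ([(o0, k)] ++ q2), ?_, ?_⟩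
            · rw [hdec, List.append_assoc]
              exact List.Sublist.append hq1 (List.Sublist.append (List.Sublist.refl _) hq2)
            · rw [hval q1 [(o0, k)] q2 hq1 (Or.inr rfl) hq2]
              simp
          · refine ⟨a, ha, q1 ++ ([] ++ q2), ?_, ?_⟩
            · rw [hdec, List.append_assoc]
              exact List.Sublist.append hq1 (List.Sublist.append (List.nil_sublist _) hq2)
            · rw [hval q1 [] q2 hq1 (Or.inl rfl) hq2]
              simp
        · rintro ⟨u, hu, q, hq, rfl⟩
          rw [hdec, List.append_assoc] at hq
          rcases List.sublist_append_iff.mp hq with ⟨q1, qr, rfl, hq1, hqr⟩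
          rcases List.sublist_append_iff.mp hqr with ⟨q0, q2, rfl, hq0, hq2⟩
          rcases List.sublist_singleton.mp hq0 with rfl | rfl
          · refine ⟨u ++ '(' :: pvDel cs 0 (o0 + 1) k (pvFlat q1) ++ [')'],
              (hUmem _).mpr ⟨u, hu, q1, hq1, Or.inr rfl⟩, q2, hq2, ?_⟩
            rw [hval q1 [] q2 hq1 (Or.inl rfl) hq2]
            simp
          · refine ⟨u ++ pvDel cs 0 (o0 + 1) k (pvFlat q1),
              (hUmem _).mpr ⟨u, hu, q1, hq1, Or.inl rfl⟩, q2, hq2, ?_⟩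
            rw [hval q1 [(o0, k)] q2 hq1 (Or.inr rfl) hq2]
            simp
      · rw [if_neg hch]
        have hpairs : pvPairsIn prs p j = pvPairsIn prs (p + 1) j := by
          rw [pvPairsIn, pvPairsIn]
          apply List.filter_congr
          intro pr hpr
          apply decide_eq_decide.mpr
          constructor
          · rintro ⟨hge, hltj⟩
            refine ⟨?_, hltj⟩
            rcases eq_or_lt_of_le hge with he | hlt'
            · exfalso
              have := (h3 pr hpr).2.2.2.1
              rw [show pr.1.toNat = p.toNat by omega] at this
              exact hch this
            · omega
          · rintro ⟨hge, hltj⟩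
            exact ⟨by omega, hltj⟩
        have hIH := ih (p + 1) j
          (PySem.Set.ofList (out.map (· ++ [cs.getD p.toNat ' ']))) (by omega) hjn (by omega)
          (fun pr hpr a b => hSeg pr hpr (by omega) b)
        have hstep : ∀ q : List (Int × Int), q.Sublist (pvPairsIn prs (p + 1) j) →
            pvDel cs 0 p j (pvFlat q)
              = cs.getD p.toNat ' ' :: pvDel cs 0 (p + 1) j (pvFlat q) := by
          intro q hq
          have hnotin : p ∉ pvFlat q := by
            intro hm
            have := pvFlat_bounds hlt12 hq p hm
            omega
          rw [pvDel_split cs 0 p (p + 1) j _ (by omega) (by omega), pvDel_single cs 0 p _,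
            if_pos ⟨by omega, by omega, hnotin⟩]
          simp
        refine Iff.trans (hIH x) ?_
        constructor
        · rintro ⟨u', hu', q, hq, rfl⟩
          rw [PySem.Set.mem_ofList, List.mem_map] at hu'
          rcases hu' with ⟨u, hu, rfl⟩
          refine ⟨u, hu, q, by rw [hpairs]; exact hq, ?_⟩
          rw [hstep q hq]
          simp
        · rintro ⟨u, hu, q, hq, rfl⟩
          rw [hpairs] at hq
          refine ⟨u ++ [cs.getD p.toNat ' '],
            (PySem.Set.mem_ofList _ _).mpr (List.mem_map.mpr ⟨u, hu, rfl⟩), q, hq, ?_⟩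
          rw [hstep q hq]
          simp

theorem pvSeg_nodup (cs : List Char) (m : PySem.Dict Int Int) :
    ∀ (fuel : Nat) (p j : Int) (out : PySem.Set (List Char)), out.Nodup →
    (solutionSeg cs m fuel p j out).Nodup := by
  intro fuel
  induction fuel with
  | zero => intro p j out h; exact h
  | succ fuel ih =>
    intro p j out h
    rw [solutionSeg]
    by_cases hij : j ≤ p
    · rw [if_pos hij]; exact h
    · rw [if_neg hij]
      show List.Nodup (if PySem.List.pyGetD cs p ' ' = '(' then _ else _)
      by_cases hch : PySem.List.pyGetD cs p ' ' = '('
      · rw [if_pos hch]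
        rcases hget : m.get? p with _ | k
        · exact ih _ _ _ (PySem.Set.nodup_ofList _)
        · exact ih _ _ _ (PySem.Set.nodup_union _ _ (PySem.Set.nodup_ofList _))
      · rw [if_neg hch]
        exact ih _ _ _ (PySem.Set.nodup_ofList _)

-- ---- A-side: positional filtering equals tag filtering ----

theorem pvFilter_eq : ∀ (cs : List Char) (tags : List Int) (s : Int)
    (P : Int → Prop) (_ : DecidablePred P) (Q : Int → Prop) (_ : DecidablePred Q),
    tags.length = cs.length →
    (∀ j : Nat, j < cs.length → (P (pvTagAt tags j) ↔ Q (s + (j : Int)))) →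
    ((cs.zip tags).filter (fun p => decide (P p.2))).map (fun p => p.1)
      = ((PySem.List.enumerate cs s).filter (fun p => decide (Q p.1))).map (fun p => p.2) := by
  intro cs
  induction cs with
  | nil => intro tags s P _ Q _ hlen _; simp [PySem.List.enumerate_nil]
  | cons c cs ih =>
    intro tags s P iP Q iQ hlen hpt
    cases tags with
    | nil => simp at hlen
    | cons t tags' =>
      rw [PySem.List.enumerate_cons, List.zip_cons_cons, List.filter_cons, List.filter_cons]
      have h0 : P t ↔ Q s := by
        have := hpt 0 (by simp)
        simpa [pvTagAt] using this
      have htail := ih tags' (s + 1) P iP Q iQ (by simpa using hlen) (fun j hj => by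
        have := hpt (j + 1) (by simpa using hj)
        have harith : s + ((j + 1 : Nat) : Int) = s + 1 + (j : Int) := by push_cast; ring
        rw [harith] at this
        simpa [pvTagAt] using this)
      by_cases hP : P t
      · rw [if_pos (by simpa using hP), if_pos (by simpa using h0.mp hP)]
        simpa using htail
      · rw [if_neg (by simpa using hP), if_neg (by simpa using fun hq => hP (h0.mpr hq))]
        exact htail

-- ---- final-state consequences of the invariant ----

def pvIdOf (tags : List Int) (pr : Int × Int) : Int := pvTagAt tags pr.1.toNat

theorem pvIdOf_of_posList {tags : List Int} {t : Int} {pr : Int × Int}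
    (hpl : pvPosList tags t = [pr.1, pr.2]) : pvIdOf tags pr = t := by
  have hm : pr.1 ∈ pvPosList tags t := by rw [hpl]; exact List.mem_cons_self
  rcases pvMem_posList.mp hm with ⟨j, _, hje, hjt⟩
  rw [pvIdOf, hje]
  simpa using hjt

theorem pvFinal_pairs {bn : Int} {tags : List Int} {prs : List (Int × Int)} {ids : List Int}
    (hInv : pvInv bn [] tags [] prs ids) :
    ∀ pr ∈ prs, 0 ≤ pvIdOf tags pr ∧ pvIdOf tags pr < bn ∧
      pvPosList tags (pvIdOf tags pr) = [pr.1, pr.2] := by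
  intro pr hpr
  rcases pvForall₂_mem_left hInv.2.2.2.2.1 hpr with ⟨t, _, h0, hlt, hpl⟩
  rw [pvIdOf_of_posList hpl]
  exact ⟨h0, hlt, hpl⟩

theorem pvFinal_cover {bn : Int} {tags : List Int} {prs : List (Int × Int)} {ids : List Int}
    (hInv : pvInv bn [] tags [] prs ids) :
    ∀ t : Int, 0 ≤ t → t < bn → ∃ pr ∈ prs, pvIdOf tags pr = t := by
  intro t h0 hlt
  rcases hInv.2.2.2.2.2.1 t h0 hlt with hs | hi
  · cases hs
  · rcases pvForall₂_mem_right hInv.2.2.2.2.1 hi with ⟨pr, hpr, _, _, hpl⟩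
    exact ⟨pr, hpr, pvIdOf_of_posList hpl⟩

-- ---- a selected tag subset and the matching pair subset keep the same characters ----

theorem pvKeep {bn : Int} {tags : List Int} {prs : List (Int × Int)} {ids : List Int}
    (hInv : pvInv bn [] tags [] prs ids)
    {q : List (Int × Int)} (hq : q.Sublist prs)
    {c : List Int}
    (hmatch : ∀ t : Int, t ∈ c ↔ ∃ pr ∈ q, pvIdOf tags pr = t) :
    ∀ j : Nat, j < tags.length →
      ((pvTagAt tags j ∉ c ∨ pvTagAt tags j = -100) ↔
        ((0 : Int) + (j : Int)) ∉ pvFlat q) := by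
  intro j hj
  rw [zero_add]
  constructor
  · intro h hmem
    rcases List.mem_flatMap.mp hmem with ⟨pr, hprq, hj2⟩
    have hfacts := pvFinal_pairs hInv pr (hq.subset hprq)
    have hjm : (j : Int) ∈ pvPosList tags (pvIdOf tags pr) := by
      rw [hfacts.2.2]; simpa using hj2
    rcases pvMem_posList.mp hjm with ⟨j', _, hje, hjt⟩
    have hjj : j' = j := by exact_mod_cast hje.symm
    subst hjj
    have htc : pvTagAt tags j' ∈ c := (hmatch _).mpr ⟨pr, hprq, hjt.symm ▸ rfl⟩
    rcases h with hnc | hm100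
    · exact hnc htc
    · rw [hm100] at hjt
      have := hfacts.1
      omega
  · intro h
    by_cases hm100 : pvTagAt tags j = -100
    · exact Or.inr hm100
    · left
      intro htc
      rcases (hmatch _).mp htc with ⟨pr, hprq, hid⟩
      have hfacts := pvFinal_pairs hInv pr (hq.subset hprq)
      rw [hid] at hfacts
      have hjm : (j : Int) ∈ pvPosList tags (pvTagAt tags j) :=
        pvMem_posList.mpr ⟨j, hj, rfl, rfl⟩
      rw [hfacts.2.2] at hjm
      exact h (List.mem_flatMap.mpr ⟨pr, hprq, by simpa using hjm⟩)

theorem pvStrEq {bn : Int} {cs : List Char} {tags : List Int} {prs : List (Int × Int)}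
    {ids : List Int} (hInv : pvInv bn [] tags [] prs ids) (hlen : tags.length = cs.length)
    {q : List (Int × Int)} (hq : q.Sublist prs)
    {c : List Int}
    (hmatch : ∀ t : Int, t ∈ c ↔ ∃ pr ∈ q, pvIdOf tags pr = t) :
    ((cs.zip tags).filter (fun p => decide (p.2 ∉ c ∨ p.2 = -100))).map (fun p => p.1)
      = ((PySem.List.enumerate cs 0).filter
          (fun p => decide (p.1 ∉ pvFlat q))).map (fun p => p.2) :=
  pvFilter_eq cs tags 0 (fun t => t ∉ c ∨ t = -100) inferInstance
    (fun i => i ∉ pvFlat q) inferInstance hlen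
    (fun j hj => pvKeep hInv hq hmatch j (by omega))

-- ===== VERDICT (by name: the statement is the Claim_ definition above) =====
theorem solution_spec : Claim_equal_solution := by
  intro e _hDom hPre
  unfold Spec_solution solution solution_alt
  obtain ⟨hbal0, hcnt0⟩ := hPre
  have hInv0 : pvInv 0 [] [] [] [] [] :=
    ⟨le_refl 0, List.Pairwise.nil, by simp, List.Forall₂.nil, List.Forall₂.nil,
      fun t h1 h2 => by omega, by simp⟩
  obtain ⟨bn, stA', tags, stB', prs, ids, hA, hB, hInv, hlen, hcnt⟩ :=
    pvJoint e.toList 0 [] [] [] [] [] hInv0 (by simpa using hbal0)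
  have hstA : stA' = [] := by
    have : stA'.length = 0 := by simp only [List.length_nil] at hcnt; omega
    exact List.eq_nil_of_length_eq_zero this
  subst hstA
  have hstB : stB' = [] := by
    have hl := hInv.2.2.2.1.length_eq
    exact List.eq_nil_of_length_eq_zero (by simpa using hl)
  subst hstB
  simp only [List.length_nil, Nat.cast_zero] at hB
  have hS0 : pvStruct [] [] [] :=
    ⟨List.Pairwise.nil, by simp, by simp, List.Pairwise.nil, by simp, by simp⟩
  have hW := pvWalk e.toList [] [] [] hS0 [] prs (by simpa using hB)
  simp only [List.length_nil, Nat.cast_zero, List.nil_append] at hW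
  obtain ⟨hBfold, hStruct⟩ := hW
  simp only [hA, hBfold]
  simp only [List.length_nil, Nat.zero_add] at hlen
  have hbn0 := hInv.1
  -- abbreviations
  have hprs3 := hStruct.2.2.1
  have hprsfull : pvPairsIn prs 0 (e.toList.length : Int) = prs := by
    rw [pvPairsIn]
    apply List.filter_eq_self.mpr
    intro pr hpr
    have := hprs3 pr hpr
    simp only [decide_eq_true_eq]
    omega
  have hVmem0 := pvSeg_mem e.toList prs hStruct e.toList.length 0 (e.toList.length : Int)
    (PySem.Set.ofList [[]]) (le_refl 0) (le_refl _) (by omega)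
    (fun pr hpr _ _ => (hprs3 pr hpr).2.2.1)
  have hVmem : ∀ x : List Char,
      x ∈ solutionSeg e.toList (PySem.Dict.mk prs) e.toList.length 0 (e.toList.length : Int)
        (PySem.Set.ofList [[]]) ↔
      ∃ q, q.Sublist (pvPairsIn prs 0 (e.toList.length : Int)) ∧
        x = pvDel e.toList 0 0 (e.toList.length : Int) (pvFlat q) := by
    intro x
    rw [hVmem0 x]
    constructor
    · rintro ⟨u, hu, q, hq, rfl⟩
      have hu' : u = [] := by simpa using hu
      subst hu'
      exact ⟨q, hq, by simp⟩
    · rintro ⟨q, hq, rfl⟩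
      exact ⟨[], by simp, q, hq, by simp⟩
  have hbridge : ∀ D : List Int, pvDel e.toList 0 0 (e.toList.length : Int) D
      = ((PySem.List.enumerate e.toList 0).filter
          (fun p => decide (p.1 ∉ D))).map (·.2) := by
    intro D
    rw [pvDel_eq_filter]
    congr 1
    apply List.filter_congr
    intro p hp
    rcases (PySem.List.mem_enumerate_iff _ _ _).mp hp with ⟨kk, hkk, rfl⟩
    apply decide_eq_decide.mpr
    constructor
    · rintro ⟨-, -, hni⟩; exact hni
    · intro hni
      refine ⟨by omega, by push_cast; omega, hni⟩
  have hfull0 : pvDel e.toList 0 0 (e.toList.length : Int) (pvFlat []) = e.toList := by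
    rw [show pvFlat [] = [] from rfl]
    exact pvDel_full e.toList 0 0 _ (le_refl 0) (by omega)
  have hfullq : ∀ q : List (Int × Int), q.Sublist prs → q ≠ [] →
      pvDel e.toList 0 0 (e.toList.length : Int) (pvFlat q) ≠ e.toList := by
    intro q hq hne heq
    obtain ⟨pr, hprq⟩ := List.exists_mem_of_ne_nil q hne
    have hbd := hprs3 pr (hq.subset hprq)
    have hlt := pvDel_length_lt e.toList 0 0 (e.toList.length : Int) (pvFlat q) pr.1
      (pvMem_flat.mpr ⟨pr, hprq, Or.inl rfl⟩) (by omega) (by omega) (by omega) (by omega)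
    rw [heq] at hlt
    exact lt_irrefl _ hlt
  have hinj : Function.Injective String.ofList := by
    intro a b h
    have := congrArg String.toList h
    simpa using this
  congr 1
  apply PySem.List.sorted_eq_sorted_of_perm _ _ _ (fun a b h => h)
  apply (List.perm_ext_iff_of_nodup (PySem.Set.nodup_ofList _)
    (List.Nodup.map hinj (PySem.Set.nodup_discard _ _
      (pvSeg_nodup _ _ _ _ _ _ (PySem.Set.nodup_ofList _))))).mpr
  intro x
  rw [PySem.Set.mem_ofList]
  rw [PySem.List.foldl_append_singleton_eq_map]
  simp only [List.nil_append, List.mem_map]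
  constructor
  · rintro ⟨c, hcmem, rfl⟩
    rcases (pvCombi_mem bn hbn0 c).mp hcmem with ⟨hc, hcne⟩
    set q := prs.filter (fun pr => decide (pvIdOf tags pr ∈ c)) with hqdef
    have hq : q.Sublist prs := List.filter_sublist
    have hmatch : ∀ t : Int, t ∈ c ↔ ∃ pr ∈ q, pvIdOf tags pr = t := by
      intro t
      constructor
      · intro htc
        have hmem := hc.subset htc
        rw [PySem.List.mem_pyRange_one] at hmem
        rcases pvFinal_cover hInv t hmem.1 hmem.2 with ⟨pr, hpr, hid⟩
        exact ⟨pr, List.mem_filter.mpr ⟨hpr, by simp [hid, htc]⟩, hid⟩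
      · rintro ⟨pr, hprq, rfl⟩
        simpa using (List.mem_filter.mp hprq).2
    have hqne : q ≠ [] := by
      rcases List.exists_mem_of_ne_nil c hcne with ⟨t, htc⟩
      rcases (hmatch t).mp htc with ⟨pr, hprq, _⟩
      exact List.ne_nil_of_mem hprq
    refine ⟨pvDel e.toList 0 0 (e.toList.length : Int) (pvFlat q),
      PySem.Set.mem_discard _ _ _ |>.mpr ⟨(hVmem _).mpr ⟨q, by rw [hprsfull]; exact hq, rfl⟩,
        hfullq q hq hqne⟩, ?_⟩
    rw [PySem.List.foldl_append_ite (fun p : Char × Int => p.2 ∉ c ∨ p.2 = -100)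
      (fun p : Char × Int => p.1)]
    rw [List.nil_append]
    exact (congrArg String.ofList ((pvStrEq hInv hlen hq hmatch).trans
      (hbridge (pvFlat q)).symm)).symm
  · rintro ⟨a, hamem, rfl⟩
    obtain ⟨haV, hane⟩ := (PySem.Set.mem_discard _ _ _).mp hamem
    rcases (hVmem a).mp haV with ⟨q, hqsub, rfl⟩
    rw [hprsfull] at hqsub
    have hqne : q ≠ [] := by
      rintro rfl
      exact hane hfull0
    set c := (PySem.List.pyRange 0 bn).filter
      (fun t => decide (∃ pr ∈ q, pvIdOf tags pr = t)) with hcdef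
    have hc : c.Sublist (PySem.List.pyRange 0 bn) := List.filter_sublist
    have hmatch : ∀ t : Int, t ∈ c ↔ ∃ pr ∈ q, pvIdOf tags pr = t := by
      intro t
      constructor
      · intro htc
        simpa using (List.mem_filter.mp htc).2
      · rintro ⟨pr, hprq, rfl⟩
        have hfacts := pvFinal_pairs hInv pr (hqsub.subset hprq)
        refine List.mem_filter.mpr ⟨?_, decide_eq_true ⟨pr, hprq, rfl⟩⟩
        rw [PySem.List.mem_pyRange_one]
        exact ⟨hfacts.1, hfacts.2.1⟩
    have hcne : c ≠ [] := by
      rcases List.exists_mem_of_ne_nil q hqne with ⟨pr, hprq⟩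
      exact List.ne_nil_of_mem ((hmatch (pvIdOf tags pr)).mpr ⟨pr, hprq, rfl⟩)
    refine ⟨c, (pvCombi_mem bn hbn0 c).mpr ⟨hc, hcne⟩, ?_⟩
    rw [PySem.List.foldl_append_ite (fun p : Char × Int => p.2 ∉ c ∨ p.2 = -100)
      (fun p : Char × Int => p.1)]
    rw [List.nil_append]
    exact congrArg String.ofList ((pvStrEq hInv hlen hqsub hmatch).trans
      (hbridge (pvFlat q)).symm)
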